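-- pv_equiv track=rewrite | github.com/C0dyS/8.03.2024Homework | main.py | fourth_task_b
-- ===== SOURCE A (Python) =====
-- def fourth_task_b(llist):
--         summ = 0
--         for element in llist:
--             if not isinstance(element, int):
--                 raise ValueError('not integer value found')
--             if element < 0:
--                 raise ValueError('negative number found')
--         return sum(llist)
-- ===== SOURCE B (Python) =====
-- def fourth_task_b(llist):
--     # divide-and-conquer: validate-and-sum each half recursively (depth O(log n))
--     def go(lo, hi):
--         if hi - lo == 0:
--             return 0
--         if hi - lo == 1:
--             element = llist[lo]
--             if not isinstance(element, int):
--                 raise ValueError('not integer value found')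
--             if element < 0:
--                 raise ValueError('negative number found')
--             return element
--         mid = (lo + hi) // 2
--         return go(lo, mid) + go(mid, hi)
--     return go(0, len(llist))
-- ===== Notes on version B (the rewrite author's own statement) =====
-- stated objective: alternative
-- what changed: Replaces A's linear validation scan followed by the sum() builtin with a single divide-and-conquer recursion over index ranges that validates and sums each half, combining results by addition.
import Mathlib
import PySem

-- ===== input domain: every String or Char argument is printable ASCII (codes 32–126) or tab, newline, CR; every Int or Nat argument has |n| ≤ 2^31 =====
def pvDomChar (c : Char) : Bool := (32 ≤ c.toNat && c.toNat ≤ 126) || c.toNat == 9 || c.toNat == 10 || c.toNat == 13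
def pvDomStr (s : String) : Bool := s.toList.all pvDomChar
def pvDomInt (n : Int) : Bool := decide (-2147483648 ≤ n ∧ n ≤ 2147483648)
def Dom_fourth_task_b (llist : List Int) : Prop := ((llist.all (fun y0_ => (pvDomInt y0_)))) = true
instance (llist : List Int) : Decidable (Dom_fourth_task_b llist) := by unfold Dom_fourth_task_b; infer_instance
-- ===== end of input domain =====

-- B replaces A's validation scan + sum() builtin with a divide-and-conquer recursion over index
-- ranges that validates and sums each half (same return value; alternative structure, not faster).
-- ===== PORT A =====
-- A's validation loop: walks the list, "raising" (false) on a negative element.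
def fourth_task_b_check : List Int → Bool
  | [] => true
  | x :: xs => if x < 0 then false else fourth_task_b_check xs

-- sum(llist) ported as a left fold from 0, as Python's sum() computes it.
def fourth_task_b (llist : List Int) : Int :=
  if fourth_task_b_check llist then llist.foldl (· + ·) 0 else 0  -- else-branch unreachable under Pre_ (A raises there)

-- ===== PORT B =====
-- go fuel lo hi: divide-and-conquer over the index range [lo, hi); at a singleton leaf it
-- validates the element ("raise" = dummy 0, unreachable under Pre_) and returns it, else splits
-- at the floor midpoint and adds the two halves.  The fuel argument is a totality guard only
-- (fuel ≥ hi - lo at every call, so the 0-fuel branch is never reached).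
def fourth_task_b_alt_go (llist : List Int) : Nat → Int → Int → Int
  | 0, _, _ => 0  -- fuel exhausted: unreachable, fuel ≥ hi - lo at every call
  | fuel + 1, lo, hi =>
    if hi - lo = 0 then 0
    else if hi - lo = 1 then
      let element := (PySem.List.pyGet? llist lo).getD 0  -- getD 0 : IndexError, unreachable for 0 ≤ lo < len
      if element < 0 then 0 else element  -- 0 = raise ValueError, unreachable under Pre_
    else
      let mid := PySem.Int.floordiv (lo + hi) 2
      fourth_task_b_alt_go llist fuel lo mid + fourth_task_b_alt_go llist fuel mid hi

def fourth_task_b_alt (llist : List Int) : Int :=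
  fourth_task_b_alt_go llist llist.length 0 llist.length

-- ===== PRECONDITION & SPEC =====
-- Pre_ excludes lists containing a negative element, where Python A raises ValueError.
def Pre_fourth_task_b (llist : List Int) : Prop := ∀ x ∈ llist, 0 ≤ x
instance (llist : List Int) : Decidable (Pre_fourth_task_b llist) := by unfold Pre_fourth_task_b; infer_instance
def pvWitness_fourth_task_b : List Int := [1, 2, 3]

def Spec_fourth_task_b (llist : List Int) (out : Int) : Prop := out = fourth_task_b_alt llist
instance (llist : List Int) (out : Int) : Decidable (Spec_fourth_task_b llist out) := by unfold Spec_fourth_task_b; infer_instance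

-- ===== CLAIM (what is proved, stated in full; the proofs are below) =====
def Claim_equal_fourth_task_b : Prop := ∀ (llist : List Int), Dom_fourth_task_b llist → Pre_fourth_task_b llist → Spec_fourth_task_b llist (fourth_task_b llist)

-- ===== LEMMAS AND PROOFS =====
theorem fourth_task_b_check_true (l : List Int) (h : ∀ x ∈ l, 0 ≤ x) :
    fourth_task_b_check l = true := by
  induction l with
  | nil => rfl
  | cons x xs ih =>
    have hx := h x (by simp)
    simp only [fourth_task_b_check]
    rw [if_neg (by omega)]
    exact ih (fun y hy => h y (by simp [hy]))

-- go computes the sum of the slice [lo, hi) when all elements are nonnegative and fuel suffices.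
theorem fourth_task_b_alt_go_eq (l : List Int) (h : ∀ x ∈ l, 0 ≤ x)
    (fuel : Nat) (lo hi : Int) (hlo : 0 ≤ lo) (hle : lo ≤ hi) (hhi : hi ≤ l.length)
    (hfuel : hi - lo ≤ fuel) :
    fourth_task_b_alt_go l fuel lo hi = ((l.drop lo.toNat).take (hi - lo).toNat).sum := by
  induction fuel generalizing lo hi with
  | zero =>
    have : hi = lo := by omega
    simp [fourth_task_b_alt_go, this]
  | succ fuel ih =>
    rw [fourth_task_b_alt_go]
    by_cases h0 : hi - lo = 0
    · simp [h0]
    by_cases h1 : hi - lo = 1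
    · rw [if_neg h0, if_pos h1]
      have hlt : lo.toNat < l.length := by omega
      have hget : PySem.List.pyGet? l lo = some l[lo.toNat] := by
        rw [PySem.List.pyGet?_of_nonneg _ hlo]; exact List.getElem?_eq_getElem hlt
      have hmem : l[lo.toNat] ∈ l := List.getElem_mem hlt
      have hnn := h _ hmem
      simp only [hget, Option.getD_some]
      rw [if_neg (by omega)]
      rw [show (hi - lo).toNat = 1 by omega, List.take_one]
      have : (l.drop lo.toNat).head? = some l[lo.toNat] := by
        rw [List.head?_drop]
        simp [hlt]
      simp [this]
    · rw [if_neg h0, if_neg h1]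
      have hmid := PySem.Int.floordiv_two_mid_bounds (lo := lo) (hi := hi) (by omega)
      have hfm := PySem.Int.floordiv_mul_add_mod (lo + hi) 2
      have hmnn := PySem.Int.mod_nonneg (a := lo + hi) (b := 2) (by omega)
      have hmlt := PySem.Int.mod_lt (a := lo + hi) (b := 2) (by omega)
      have hlom : lo < PySem.Int.floordiv (lo + hi) 2 := by omega
      have hmhi : PySem.Int.floordiv (lo + hi) 2 < hi := by omega
      show fourth_task_b_alt_go l fuel lo (PySem.Int.floordiv (lo + hi) 2) +
             fourth_task_b_alt_go l fuel (PySem.Int.floordiv (lo + hi) 2) hi =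
          (List.take (hi - lo).toNat (List.drop lo.toNat l)).sum
      generalize PySem.Int.floordiv (lo + hi) 2 = mid at hlom hmhi
      rw [ih lo mid (by omega) (by omega) (by omega) (by omega),
          ih mid hi (by omega) (by omega) (by omega) (by omega)]
      have hsplit : (l.drop lo.toNat).take (hi - lo).toNat =
          (l.drop lo.toNat).take (mid - lo).toNat ++ (l.drop mid.toNat).take (hi - mid).toNat := by
        rw [show (hi - lo).toNat = (mid - lo).toNat + (hi - mid).toNat by omega, List.take_add]
        congr 1
        rw [List.drop_drop]
        rw [show lo.toNat + (mid - lo).toNat = mid.toNat by omega]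
      rw [hsplit, List.sum_append]

theorem foldl_add_eq_sum (l : List Int) : ∀ a : Int, l.foldl (· + ·) a = a + l.sum := by
  induction l with
  | nil => simp
  | cons x xs ih => intro a; simp only [List.foldl, List.sum_cons, ih]; ring

-- ===== VERDICT (by name: the statement is the Claim_ definition above) =====
theorem fourth_task_b_spec : Claim_equal_fourth_task_b := by
  intro llist _ hpre
  unfold Spec_fourth_task_b fourth_task_b fourth_task_b_alt
  rw [if_pos (fourth_task_b_check_true llist hpre),
      fourth_task_b_alt_go_eq llist hpre llist.length 0 llist.length (by omega) (by omega)
        (by omega) (by omega)]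
  simp [foldl_add_eq_sum llist 0]
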